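-- pv_equiv track=rewrite | github.com/Leogrc01/PygameProject | typegame/game.py | get_character_position
-- ===== SOURCE A (Python) =====
-- from typing import List, Tuple, Dict, Any
--
-- def get_character_position(char_index: int, lines: List[str]) -> Tuple[int, int]:
--     """Get the screen position (line, position_in_line) for a character index."""
--     current_index = 0
--
--     for line_num, line in enumerate(lines):
--         if current_index + len(line) >= char_index:
--             return line_num, char_index - current_index
--         current_index += len(line)
--         if line_num < len(lines) - 1:  # Add space between lines
--             current_index += 1
--
--     return len(lines) - 1, len(lines[-1]) if lines else 0
-- ===== SOURCE B (Python) =====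
-- from typing import List, Tuple
--
--
-- def _bisect_left(a, x):
--     lo = 0
--     hi = len(a)
--     while lo < hi:
--         mid = (lo + hi) // 2
--         if a[mid] < x:
--             lo = mid + 1
--         else:
--             hi = mid
--     return lo
--
--
-- def get_character_position(char_index: int, lines: List[str]) -> Tuple[int, int]:
--     """Offset-table + binary search: ends[i] = cumulative index at the end of line i
--     (counting the +1 inter-line gap); the answer line is the first i with ends[i] >= char_index."""
--     if not lines:
--         return (-1, 0)
--     ends = []
--     acc = 0
--     for line in lines:
--         ends.append(acc + len(line))
--         acc += len(line) + 1
--     i = _bisect_left(ends, char_index)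
--     if i == len(lines):
--         return (len(lines) - 1, len(lines[-1]))
--     return (i, char_index - (ends[i] - len(lines[i])))
-- ===== Notes on version B (the rewrite author's own statement) =====
-- stated objective: alternative
-- what changed: B replaces A's single accumulating linear scan with a two-phase algorithm: it first builds a cumulative offset table ends[i] (end offset of line i including the +1 inter-line gaps), then locates the answer line with a hand-written bisect_left binary search over that table and reads the position from the table.
import Mathlib
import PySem

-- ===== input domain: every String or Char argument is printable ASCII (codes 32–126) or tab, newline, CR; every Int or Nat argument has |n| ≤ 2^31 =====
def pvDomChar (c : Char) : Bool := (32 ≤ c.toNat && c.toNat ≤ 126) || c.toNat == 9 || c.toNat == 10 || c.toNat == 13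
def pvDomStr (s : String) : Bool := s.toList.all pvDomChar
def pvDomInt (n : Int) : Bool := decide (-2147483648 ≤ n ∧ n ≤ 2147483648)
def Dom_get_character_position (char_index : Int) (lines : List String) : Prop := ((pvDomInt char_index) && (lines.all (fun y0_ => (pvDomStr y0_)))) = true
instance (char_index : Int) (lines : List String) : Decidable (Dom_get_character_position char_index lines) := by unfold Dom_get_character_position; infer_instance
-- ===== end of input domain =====

-- B replaces A's single accumulating linear scan by building a cumulative offset table and
-- binary-searching it (bisect_left); objective: alternative algorithm (O(n) build + O(log n) search).


-- ===== PORT A =====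
-- A's for-loop over enumerate(lines) with the running offset current_index.
def gcpGo (char_index : Int) (lines : List String) : Int → Nat → List String → Int × Int
  | _ci, _i, [] =>
      ((lines.length : Int) - 1,
        if lines ≠ [] then PySem.Str.len (PySem.List.pyGetD lines (-1) "") else 0)
  | ci, i, line :: rest =>
      if char_index ≤ ci + PySem.Str.len line then
        ((i : Int), char_index - ci)
      else
        gcpGo char_index lines
          (if (i : Int) < (lines.length : Int) - 1 then ci + PySem.Str.len line + 1
           else ci + PySem.Str.len line)
          (i + 1) rest

def get_character_position (char_index : Int) (lines : List String) : Int × Int :=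
  gcpGo char_index lines 0 0 lines

-- ===== PORT B =====
def get_character_position_alt (char_index : Int) (lines : List String) : Int × Int :=
  if lines = [] then (-1, 0)
  else
    let ends := (lines.foldl
      (fun (p : Int × List Int) line =>
        (p.1 + PySem.Str.len line + 1, p.2 ++ [p.1 + PySem.Str.len line]))
      ((0 : Int), ([] : List Int))).2
    let i := PySem.List.bisectLeft ends char_index
    if i = lines.length then
      ((lines.length : Int) - 1, PySem.Str.len (PySem.List.pyGetD lines (-1) ""))
    else
      ((i : Int), char_index - (ends.getD i 0 - PySem.Str.len (lines.getD i "")))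

-- ===== PRECONDITION & SPEC =====
def Spec_get_character_position (char_index : Int) (lines : List String) (out : Int × Int) : Prop := out = get_character_position_alt char_index lines
instance (char_index : Int) (lines : List String) (out : Int × Int) : Decidable (Spec_get_character_position char_index lines out) := by unfold Spec_get_character_position; infer_instance

-- ===== CLAIM (what is proved, stated in full; the proofs are below) =====
def Claim_equal_get_character_position : Prop := ∀ (char_index : Int) (lines : List String), Dom_get_character_position char_index lines → Spec_get_character_position char_index lines (get_character_position char_index lines)

-- ===== LEMMAS AND PROOFS =====

-- cumulative line-end offsets starting at accumulated offset `acc`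
def pvEndsOf : Int → List String → List Int
  | _, [] => []
  | acc, l :: ls => (acc + PySem.Str.len l) :: pvEndsOf (acc + PySem.Str.len l + 1) ls

theorem pvEndsOf_length (acc : Int) (ls : List String) :
    (pvEndsOf acc ls).length = ls.length := by
  induction ls generalizing acc with
  | nil => rfl
  | cons l ls ih => simp [pvEndsOf, ih]

theorem pvEndsOf_le (acc : Int) (ls : List String) :
    ∀ e ∈ pvEndsOf acc ls, acc ≤ e := by
  induction ls generalizing acc with
  | nil => simp [pvEndsOf]
  | cons l ls ih =>
    intro e he
    have hL : (0 : Int) ≤ PySem.Str.len l := by simp [PySem.Str.len_eq]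
    simp only [pvEndsOf, List.mem_cons] at he
    rcases he with rfl | he
    · omega
    · have := ih (acc + PySem.Str.len l + 1) e he; omega

theorem pvEndsOf_sorted (acc : Int) (ls : List String) :
    (pvEndsOf acc ls).Pairwise (· ≤ ·) := by
  induction ls generalizing acc with
  | nil => simp [pvEndsOf]
  | cons l ls ih =>
    refine List.Pairwise.cons ?_ (ih _)
    intro e he
    have := pvEndsOf_le (acc + PySem.Str.len l + 1) ls e he
    omega

theorem pvFold_ends (ls : List String) (acc : Int) (es : List Int) :
    (ls.foldl
      (fun (p : Int × List Int) line =>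
        (p.1 + PySem.Str.len line + 1, p.2 ++ [p.1 + PySem.Str.len line]))
      (acc, es)).2 = es ++ pvEndsOf acc ls := by
  induction ls generalizing acc es with
  | nil => simp [pvEndsOf]
  | cons l ls ih =>
    rw [List.foldl_cons, ih]
    simp [pvEndsOf]

-- bisect_left on a sorted table is the first index with x ≤ entry
theorem pvBisect_eq_findIdx (es : List Int) (x : Int) (hs : es.Pairwise (· ≤ ·)) :
    PySem.List.bisectLeft es x = es.findIdx (fun e => decide (x ≤ e)) := by
  obtain ⟨hle, hlt, hge⟩ := PySem.List.bisectLeft_spec es x hs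
  set b := PySem.List.bisectLeft es x with hb
  rcases lt_or_eq_of_le hle with h | h
  · symm
    rw [List.findIdx_eq h]
    refine ⟨by simpa using hge b h le_rfl, ?_⟩
    intro j hj
    simpa using not_le.mpr (hlt j (lt_trans hj h) hj)
  · rw [h]
    symm
    refine List.findIdx_eq_length.mpr ?_
    intro e he
    obtain ⟨j, hj, rfl⟩ := List.mem_iff_getElem.mp he
    exact decide_eq_false (not_le.mpr (hlt j hj (h ▸ hj)))

-- A's loop, characterised by the first line-end offset reaching char_index
theorem gcpGo_spec (x : Int) (lines : List String) :
    ∀ (rest : List String) (ci : Int) (i : Nat), i + rest.length = lines.length →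
      gcpGo x lines ci i rest =
        (let es := pvEndsOf ci rest
         let k := es.findIdx (fun e => decide (x ≤ e))
         if k < rest.length then
           (((i + k : Nat) : Int), x - (es.getD k 0 - PySem.Str.len (rest.getD k "")))
         else
           ((lines.length : Int) - 1,
             if lines ≠ [] then PySem.Str.len (PySem.List.pyGetD lines (-1) "") else 0)) := by
  intro rest
  induction rest with
  | nil => intro ci i _; simp [gcpGo, pvEndsOf]
  | cons l rest' ih =>
    intro ci i hlen
    simp only [List.length_cons] at hlen
    rw [gcpGo]
    by_cases hx : x ≤ ci + PySem.Str.len l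
    · have hd : decide (x ≤ ci + PySem.Str.len l) = true := decide_eq_true hx
      rw [if_pos hx]
      simp only [pvEndsOf, List.findIdx_cons, hd, cond_true, List.length_cons]
      rw [if_pos (Nat.succ_pos _)]
      simp only [List.getD_cons_zero, Nat.add_zero, add_sub_cancel_right]
    · have hd : decide (x ≤ ci + PySem.Str.len l) = false := decide_eq_false hx
      rw [if_neg hx]
      cases rest' with
      | nil =>
        simp only [pvEndsOf, List.findIdx_cons, hd, cond_false]
        simp [gcpGo]
      | cons l2 rest'' =>
        have hi : (i : Int) < (lines.length : Int) - 1 := by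
          simp only [List.length_cons] at hlen; omega
        rw [if_pos hi]
        rw [ih (ci + PySem.Str.len l + 1) (i + 1) (by simp only [List.length_cons] at hlen ⊢; omega)]
        simp only [List.length_cons]
        rw [show pvEndsOf ci (l :: l2 :: rest'') =
              (ci + PySem.Str.len l) :: pvEndsOf (ci + PySem.Str.len l + 1) (l2 :: rest'') from rfl,
            List.findIdx_cons, hd, cond_false]
        set K := (pvEndsOf (ci + PySem.Str.len l + 1) (l2 :: rest'')).findIdx
            (fun e => decide (x ≤ e)) with hK
        by_cases hk : K < rest''.length + 1
        · rw [if_pos hk, if_pos (show K + 1 < rest''.length + 1 + 1 by omega)]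
          simp only [List.getD_cons_succ, Prod.mk.injEq]
          exact ⟨by congr 1; omega, trivial⟩
        · rw [if_neg hk, if_neg (show ¬ (K + 1 < rest''.length + 1 + 1) by omega)]

-- ===== VERDICT (by name: the statement is the Claim_ definition above) =====
theorem get_character_position_spec : Claim_equal_get_character_position := by
  intro x lines _
  unfold Spec_get_character_position get_character_position get_character_position_alt
  by_cases hnil : lines = []
  · subst hnil; simp [gcpGo]
  · rw [if_neg hnil]
    have hends := pvFold_ends lines 0 []
    simp only [List.nil_append] at hends
    simp only [hends]
    rw [gcpGo_spec x lines lines 0 0 (by simp),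
        pvBisect_eq_findIdx (pvEndsOf 0 lines) x (pvEndsOf_sorted 0 lines)]
    have hlen := pvEndsOf_length 0 lines
    have hkle : (pvEndsOf 0 lines).findIdx (fun e => decide (x ≤ e)) ≤ (pvEndsOf 0 lines).length :=
      List.findIdx_le_length
    by_cases hke : (pvEndsOf 0 lines).findIdx (fun e => decide (x ≤ e)) = lines.length
    · rw [if_neg (by omega), if_pos hke, if_pos hnil]
    · rw [if_pos (by omega), if_neg hke]
      simp
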